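-- pv_equiv track=rewrite | github.com/itsyourboifroggy/COMS127 | Assignments/ultimateTODO.py | checkItem
-- ===== SOURCE A (Python) =====
-- def checkItem(item, todoList):
--     """This function iterates through all the keys in the dictionary, and checks each list to see if a key is present.
--
--     :param String item: The String to search for in each list.
--     :param Dictionary of Lists todoList: A dictionary whose keys contain the various categories the user can access. The values are lists the user can modify.
--     :return Boolean, String, Integer: This function returns True/ False depending on whether the item was found, the String of the keyName, and the index in the list where the item was found.
--     """
--     itemFound = False
--     keyName = ""
--     index = -1
--                                                                         # Iterates through key, value in todoList and if the item is found it sets itemFound to true, keyname to key, and index to the index value of the current item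
--     for key, value in todoList.items():
--         if item in value:
--             itemFound = True
--             keyName = key
--             index = value.index(item)
--             break
--     return itemFound, keyName, index
-- ===== SOURCE B (Python) =====
-- def checkItem(item, todoList):
--     # Build a first-occurrence index of every element once, then answer with one lookup.
--     index = {}
--     for key, value in todoList.items():
--         for i, x in enumerate(value):
--             index.setdefault(x, (key, i))
--     if item in index:
--         key, i = index[item]
--         return True, key, i
--     return False, "", -1
-- ===== Notes on version B (the rewrite author's own statement) =====
-- stated objective: alternative
-- what changed: Instead of scanning each list with a membership test plus value.index and breaking at the first hit, B builds a first-occurrence hash index (element -> (key, position)) over the whole dictionary once with setdefault and then answers by a single dictionary lookup.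
import Mathlib
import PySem

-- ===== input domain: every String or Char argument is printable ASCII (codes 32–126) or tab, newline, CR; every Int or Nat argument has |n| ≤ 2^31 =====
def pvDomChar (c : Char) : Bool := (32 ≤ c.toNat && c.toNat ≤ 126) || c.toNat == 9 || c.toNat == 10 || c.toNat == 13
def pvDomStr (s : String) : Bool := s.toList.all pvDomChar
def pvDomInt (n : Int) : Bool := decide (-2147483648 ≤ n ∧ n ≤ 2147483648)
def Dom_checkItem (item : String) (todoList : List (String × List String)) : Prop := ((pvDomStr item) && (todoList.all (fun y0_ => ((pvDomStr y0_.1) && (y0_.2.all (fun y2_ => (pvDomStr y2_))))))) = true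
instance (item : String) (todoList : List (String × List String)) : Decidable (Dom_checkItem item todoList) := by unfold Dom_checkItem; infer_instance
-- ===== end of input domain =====

-- B replaces A's per-list membership test + value.index scan with one setdefault pass that
-- builds a first-occurrence index (element -> (key, position)) and a single dictionary lookup;
-- alternative decomposition, same asymptotic cost.

-- ===== PORT A =====
-- A's loop over todoList.items(): `item in value` then `value.index(item)` (guarded, so .getD 0 never fires), break = return.
def checkItemLoopA (item : String) : List (String × List String) → Bool × String × Int
  | [] => (false, "", -1)
  | (k, v) :: rest =>
    if v.contains item then
      (true, k, ((PySem.List.index? v item).getD 0 : Nat))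
    else
      checkItemLoopA item rest

def checkItem (item : String) (todoList : List (String × List String)) : Bool × String × Int :=
  checkItemLoopA item todoList

-- ===== PORT B =====
-- Source B: index = {}; for key, value in items: for i, x in enumerate(value): index.setdefault(x, (key, i));
-- then one lookup of item.
def checkItem_alt (item : String) (todoList : List (String × List String)) : Bool × String × Int :=
  match (todoList.foldl
      (fun d kv =>
        (PySem.List.enumerate kv.2 0).foldl (fun d p => d.setdefault p.2 (kv.1, p.1)) d)
      PySem.Dict.empty).get? item with
  | some (k, i) => (true, k, i)
  | none => (false, "", -1)

-- ===== PRECONDITION & SPEC =====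
def Spec_checkItem (item : String) (todoList : List (String × List String)) (out : Bool × String × Int) : Prop := out = checkItem_alt item todoList
instance (item : String) (todoList : List (String × List String)) (out : Bool × String × Int) : Decidable (Spec_checkItem item todoList out) := by unfold Spec_checkItem; infer_instance

-- ===== CLAIM (what is proved, stated in full; the proofs are below) =====
def Claim_equal_checkItem : Prop := ∀ (item : String) (todoList : List (String × List String)), Dom_checkItem item todoList → Spec_checkItem item todoList (checkItem item todoList)

-- ===== LEMMAS AND PROOFS =====

-- The (key, index) of the first occurrence of item, as an Option: reference form both ports reduce to.
def locA (item : String) : List (String × List String) → Option (String × Int)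
  | [] => none
  | (k, v) :: rest =>
    match PySem.List.index? v item with
    | some n => some (k, (n : Int))
    | none => locA item rest

lemma setdefault_eq (d : PySem.Dict String (String × Int)) (k : String) (v : String × Int) :
    d.setdefault k v = if d.contains k then d else d.insert k v := by
  by_cases hc : d.contains k = true
  · simp [PySem.Dict.setdefault, hc]
  · apply PySem.Dict.ext
    rw [if_neg hc, PySem.Dict.items_insert]
    simp [PySem.Dict.setdefault, hc]

lemma get?_setdefault (d : PySem.Dict String (String × Int)) (k x : String) (v : String × Int) :
    (d.setdefault k v).get? x = Option.or (d.get? x) (if x = k then some v else none) := by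
  rw [setdefault_eq]
  by_cases hc : d.contains k = true
  · rw [if_pos hc]
    rcases hx : d.get? x with _ | w
    · by_cases hxk : x = k
      · subst hxk
        rw [PySem.Dict.contains_eq_isSome_get?, hx] at hc
        simp at hc
      · simp [hxk]
    · simp
  · rw [if_neg hc, PySem.Dict.get?_insert]
    by_cases hxk : x = k
    · subst hxk
      rw [PySem.Dict.contains_eq_isSome_get?] at hc
      rcases hx : d.get? x with _ | w
      · simp
      · rw [hx] at hc; simp at hc
    · rw [if_neg hxk, if_neg hxk]
      simp

lemma inner_fold (item k : String) (v : List String) (s : Int)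
    (d : PySem.Dict String (String × Int)) :
    ((PySem.List.enumerate v s).foldl (fun d p => d.setdefault p.2 (k, p.1)) d).get? item
      = Option.or (d.get? item)
          ((PySem.List.index? v item).map (fun n => (k, s + (n : Int)))) := by
  induction v generalizing s d with
  | nil => simp [PySem.List.enumerate_nil, PySem.List.index?]
  | cons x xs ih =>
    rw [PySem.List.enumerate_cons, List.foldl_cons, ih]
    rw [get?_setdefault]
    by_cases h : x = item
    · subst h
      rw [PySem.List.index?_cons_self]
      rcases d.get? x with _ | w <;> simp
    · rw [PySem.List.index?_cons_of_ne xs h, if_neg (fun he => h he.symm)]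
      rcases hx : PySem.List.index? xs item with _ | n
      · rcases d.get? item with _ | w <;> simp
      · have harith : ((n + 1 : Nat) : Int) = (n : Int) + 1 := by push_cast; ring
        rcases d.get? item with _ | w <;>
          simp [harith, add_comm, add_left_comm]

lemma outer_fold (item : String) (l : List (String × List String))
    (d : PySem.Dict String (String × Int)) :
    (l.foldl
        (fun d kv =>
          (PySem.List.enumerate kv.2 0).foldl (fun d p => d.setdefault p.2 (kv.1, p.1)) d)
        d).get? item
      = Option.or (d.get? item) (locA item l) := by
  induction l generalizing d with
  | nil => simp [locA]
  | cons p rest ih =>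
    obtain ⟨k, v⟩ := p
    rw [List.foldl_cons, ih, inner_fold]
    simp only [locA]
    rcases hx : PySem.List.index? v item with _ | n
    · simp
    · rcases d.get? item with _ | w <;> simp

lemma loopA_eq_locA (item : String) (l : List (String × List String)) :
    checkItemLoopA item l
      = match locA item l with
        | some (k, i) => (true, k, i)
        | none => (false, "", -1) := by
  induction l with
  | nil => rfl
  | cons p rest ih =>
    obtain ⟨k, v⟩ := p
    by_cases h : item ∈ v
    · have hs : (PySem.List.index? v item).isSome :=
        (PySem.List.index?_isSome_iff v item).2 h
      obtain ⟨n, hn⟩ := Option.isSome_iff_exists.1 hs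
      rw [checkItemLoopA, if_pos (by simpa using h)]
      simp only [locA]
      rw [hn]
      simp
    · have hn : PySem.List.index? v item = none :=
        (PySem.List.index?_eq_none_iff v item).2 h
      rw [checkItemLoopA, if_neg (by simpa using h), ih]
      simp only [locA]
      rw [hn]

-- ===== VERDICT (by name: the statement is the Claim_ definition above) =====
theorem checkItem_spec : Claim_equal_checkItem := by
  intro item todoList _
  unfold Spec_checkItem checkItem checkItem_alt
  rw [loopA_eq_locA, outer_fold]
  rfl
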